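-- pv_equiv track=rewrite | github.com/plotplotplot/PanelTalk2TikTok | getclip.py | _find_time_fields
-- ===== SOURCE A (Python) =====
-- from typing import List
--
-- def _find_time_fields(fieldnames: List[str]):
--     start_keys = []
--     end_keys = []
--     for name in fieldnames:
--         lname = name.lower()
--         if lname in ("start", "start_time", "starttime", "begin"):
--             start_keys.append(name)
--         if lname in ("end", "end_time", "endtime", "stop"):
--             end_keys.append(name)
--     # Prefer exact "start"/"end"
--     def _prefer(keys, target):
--         for k in keys:
--             if k.lower() == target:
--                 return k
--         return keys[0] if keys else None
--
--     return _prefer(start_keys, "start"), _prefer(end_keys, "end")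
-- ===== SOURCE B (Python) =====
-- from typing import List
--
-- def _find_time_fields(fieldnames: List[str]):
--     start_exact = start_first = end_exact = end_first = None
--     for name in fieldnames:
--         lname = name.lower()
--         if lname in ("start", "start_time", "starttime", "begin"):
--             if start_first is None:
--                 start_first = name
--             if lname == "start" and start_exact is None:
--                 start_exact = name
--         if lname in ("end", "end_time", "endtime", "stop"):
--             if end_first is None:
--                 end_first = name
--             if lname == "end" and end_exact is None:
--                 end_exact = name
--     return (start_exact if start_exact is not None else start_first,
--             end_exact if end_exact is not None else end_first)
-- ===== Notes on version B (the rewrite author's own statement) =====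
-- stated objective: simpler
-- what changed: Single pass keeping four Option slots (start_exact/start_first/end_exact/end_first) instead of collecting two candidate lists and re-scanning each with a _prefer helper.
import Mathlib
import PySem

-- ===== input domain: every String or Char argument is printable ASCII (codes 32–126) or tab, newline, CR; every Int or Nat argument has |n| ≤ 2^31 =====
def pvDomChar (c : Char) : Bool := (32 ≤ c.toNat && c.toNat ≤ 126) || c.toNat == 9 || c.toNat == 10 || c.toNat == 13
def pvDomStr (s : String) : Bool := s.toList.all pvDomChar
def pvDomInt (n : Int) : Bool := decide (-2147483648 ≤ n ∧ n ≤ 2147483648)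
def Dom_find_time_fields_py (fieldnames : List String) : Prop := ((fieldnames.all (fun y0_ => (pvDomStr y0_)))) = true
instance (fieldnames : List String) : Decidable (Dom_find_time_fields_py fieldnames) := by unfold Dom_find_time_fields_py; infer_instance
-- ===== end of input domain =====

-- ===== PORT A =====
-- _prefer's loop: return the first k in keys with k.lower() == target
def preferLoop (keys : List String) (target : String) : Option String :=
  match keys with
  | [] => none
  | k :: rest => if PySem.Str.lower k = target then some k else preferLoop rest target

-- _prefer: the loop, else keys[0] if keys else None
def prefer (keys : List String) (target : String) : Option String :=
  match preferLoop keys target with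
  | some k => some k
  | none => keys.head?

-- the loop body of A: append name to the start/end candidate lists when it matches
def stepA (p : List String × List String) (name : String) : List String × List String :=
  let lname := PySem.Str.lower name
  let p := if lname = "start" ∨ lname = "start_time" ∨ lname = "starttime" ∨ lname = "begin"
           then (p.1 ++ [name], p.2) else p
  let p := if lname = "end" ∨ lname = "end_time" ∨ lname = "endtime" ∨ lname = "stop"
           then (p.1, p.2 ++ [name]) else p
  p

def find_time_fields_py (fieldnames : List String) : Option String × Option String :=
  let acc := fieldnames.foldl stepA ([], [])
  (prefer acc.1 "start", prefer acc.2 "end")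

-- ===== PORT B =====
-- one pass, four Option slots; each slot is set only if still none
-- the loop body of B: four first-wins slots, set only while still none
def stepB (st : Option String × Option String × Option String × Option String)
    (name : String) : Option String × Option String × Option String × Option String :=
  let (sE, sF, eE, eF) := st
  let lname := PySem.Str.lower name
  let (sE, sF) :=
    if lname = "start" ∨ lname = "start_time" ∨ lname = "starttime" ∨ lname = "begin" then
      ((if lname = "start" ∧ sE = none then some name else sE),
       (if sF = none then some name else sF))
    else (sE, sF)
  let (eE, eF) :=
    if lname = "end" ∨ lname = "end_time" ∨ lname = "endtime" ∨ lname = "stop" then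
      ((if lname = "end" ∧ eE = none then some name else eE),
       (if eF = none then some name else eF))
    else (eE, eF)
  (sE, sF, eE, eF)

def find_time_fields_py_alt (fieldnames : List String) : Option String × Option String :=
  let st := fieldnames.foldl stepB (none, none, none, none)
  ((st.1).orElse (fun _ => st.2.1), (st.2.2.1).orElse (fun _ => st.2.2.2))

-- ===== PRECONDITION & SPEC =====
def Spec_find_time_fields_py (fieldnames : List String) (out : Option String × Option String) : Prop := out = find_time_fields_py_alt fieldnames
instance (fieldnames : List String) (out : Option String × Option String) : Decidable (Spec_find_time_fields_py fieldnames out) := by unfold Spec_find_time_fields_py; infer_instance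

-- ===== CLAIM (what is proved, stated in full; the proofs are below) =====
def Claim_equal_find_time_fields_py : Prop := ∀ (fieldnames : List String), Dom_find_time_fields_py fieldnames → Spec_find_time_fields_py fieldnames (find_time_fields_py fieldnames)

-- ===== LEMMAS AND PROOFS =====
theorem preferLoop_append (ks : List String) (n t : String) :
    preferLoop (ks ++ [n]) t =
      ((preferLoop ks t).orElse (fun _ => if PySem.Str.lower n = t then some n else none)) := by
  induction ks with
  | nil => simp [preferLoop]
  | cons k rest ih =>
      simp only [List.cons_append, preferLoop]
      by_cases h : PySem.Str.lower k = t
      · simp [h, Option.orElse]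
      · simp [h, ih]

theorem exact_update (o : Option String) (n t : String) :
    (if PySem.Str.lower n = t ∧ o = none then some n else o) =
      o.or (if PySem.Str.lower n = t then some n else none) := by
  cases o <;> split_ifs <;> simp_all

theorem first_update (ks : List String) (n : String) :
    (if ks = [] then some n else ks.head?) = some (ks.head?.getD n) := by
  cases ks <;> simp

theorem main_invariant (fs : List String) (ks es : List String) :
    fs.foldl stepB (preferLoop ks "start", ks.head?, preferLoop es "end", es.head?) =
      (preferLoop (fs.foldl stepA (ks, es)).1 "start",
       (fs.foldl stepA (ks, es)).1.head?,
       preferLoop (fs.foldl stepA (ks, es)).2 "end",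
       (fs.foldl stepA (ks, es)).2.head?) := by
  induction fs generalizing ks es with
  | nil => simp
  | cons n rest ih =>
      have hstep : stepB (preferLoop ks "start", ks.head?, preferLoop es "end", es.head?) n =
          (preferLoop (stepA (ks, es) n).1 "start",
           (stepA (ks, es) n).1.head?,
           preferLoop (stepA (ks, es) n).2 "end",
           (stepA (ks, es) n).2.head?) := by
        simp only [stepA, stepB]
        by_cases h1 : PySem.Str.lower n = "start" ∨ PySem.Str.lower n = "start_time" ∨
            PySem.Str.lower n = "starttime" ∨ PySem.Str.lower n = "begin" <;>
          by_cases h2 : PySem.Str.lower n = "end" ∨ PySem.Str.lower n = "end_time" ∨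
            PySem.Str.lower n = "endtime" ∨ PySem.Str.lower n = "stop" <;>
          simp [h1, h2, preferLoop_append, exact_update, first_update]
      have hA : (n :: rest).foldl stepA (ks, es) = rest.foldl stepA (stepA (ks, es) n) := rfl
      rw [List.foldl_cons, hstep, hA]
      rcases hst : stepA (ks, es) n with ⟨ks', es'⟩
      exact ih ks' es'

theorem prefer_eq_orElse (ks : List String) (t : String) :
    prefer ks t = (preferLoop ks t).orElse (fun _ => ks.head?) := by
  unfold prefer
  cases preferLoop ks t <;> simp [Option.orElse]

-- ===== VERDICT (by name: the statement is the Claim_ definition above) =====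
theorem find_time_fields_py_spec : Claim_equal_find_time_fields_py := by
  intro fs _
  unfold Spec_find_time_fields_py find_time_fields_py find_time_fields_py_alt
  have h := main_invariant fs [] []
  simp only [preferLoop, List.head?_nil] at h
  simp [prefer_eq_orElse, h]
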